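-- pv_equiv track=rewrite | github.com/Wilson0825/Coding-challenges | Codejam 2018/Qualification/Universe/universe.py | save_universe
-- ===== SOURCE A (Python) =====
-- def save_universe(target, program):
--     cur_dmg = 0
--     cur_power = 1
--     for step in program:
--         if step == 'C':
--             cur_power *= 2
--         elif step == 'S':
--             cur_dmg += cur_power
--     result = 0
--     flag = 1
--     while flag == 1 and cur_dmg > target:
--         n_c = 1
--         for i in range(len(program) - 1, 0, -1):
--             if program[i] == 'C':
--                 n_c += 1
--             elif program[i] == 'S' and program[i-1] == 'C':
--                 program[i], program[i-1] = program[i-1], program[i]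
--                 result += 1
--                 cur_dmg -= cur_power >> n_c
--                 flag = 1
--                 break
--             else:
--                 flag = 0
--     if cur_dmg > target:
--         return 'IMPOSSIBLE'
--     return str(result)
-- ===== SOURCE B (Python) =====
-- def save_universe(target, program):
--     # One pass compiles the program into (exponent, floor) pairs -- one per 'S',
--     # exponent = number of 'C' before it, floor = number of 'C' before its
--     # segment (segments are delimited by non-'C'/'S' instructions, across which
--     # no swap can move an 'S').  Greedy loop then repeatedly halves the
--     # strongest still-reducible shot instead of rescanning/mutating the
--     # instruction list.  Does not mutate `program` (A swaps it in place).
--     dmg = 0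
--     c = 0
--     floor = 0
--     pairs = []
--     for step in program:
--         if step == 'C':
--             c += 1
--         elif step == 'S':
--             dmg += 1 << c
--             pairs.append([c, floor])
--         else:
--             floor = c
--     swaps = 0
--     while dmg > target:
--         best = None
--         for p in pairs:
--             if p[0] > p[1] and (best is None or p[0] > best[0]):
--                 best = p
--         if best is None:
--             return 'IMPOSSIBLE'
--         best[0] -= 1
--         dmg -= 1 << best[0]
--         swaps += 1
--     return str(swaps)
-- ===== Notes on version B (the rewrite author's own statement) =====
-- stated objective: alternative
-- what changed: B compiles the program once into (exponent, floor) pairs for the shots and greedily halves the strongest reducible shot on that numeric list, instead of A's repeated right-to-left rescans of the mutated instruction list looking for an adjacent 'CS' to swap; B also does not mutate the input list (A swaps it in place).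
import Mathlib
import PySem

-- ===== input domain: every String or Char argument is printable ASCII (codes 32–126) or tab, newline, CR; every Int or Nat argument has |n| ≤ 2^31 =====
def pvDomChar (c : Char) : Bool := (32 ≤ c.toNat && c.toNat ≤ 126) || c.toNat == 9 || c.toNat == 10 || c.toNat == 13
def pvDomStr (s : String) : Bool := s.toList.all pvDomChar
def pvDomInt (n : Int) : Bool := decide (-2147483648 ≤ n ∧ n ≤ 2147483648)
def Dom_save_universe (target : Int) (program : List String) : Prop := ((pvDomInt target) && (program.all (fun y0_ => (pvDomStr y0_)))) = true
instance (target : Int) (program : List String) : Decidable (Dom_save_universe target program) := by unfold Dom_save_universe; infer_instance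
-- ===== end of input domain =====

-- B replaces A's repeated right-to-left rescans of the (in-place mutated) instruction list by a
-- one-pass compilation into (exponent, floor) pairs plus a greedy loop on those numbers; same
-- return value (A mutates `program` in place, B does not — the equivalence is about the return value).

-- ===== PORT A =====
-- Python '>>' : here always applied to cur_power = 2^k ≥ 0, where it is floor division by 2^n (exact)
def pvShr (a : Int) (n : Int) : Int := a / (2 ^ n.toNat)

-- termination measure for A's while loop: number of pairs (i < j) with program[i]="C", program[j]="S"
def pvCSInv : List String → Nat
  | [] => 0
  | x :: xs => (if x = "C" then xs.count "S" else 0) + pvCSInv xs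

-- A's inner `for i in range(len(program)-1, 0, -1)` loop (the index argument is Python's i)
def pvScanA (prog : List String) : Nat → Int → Option (List String × Int)
  | 0, _ => none
  | i+1, n_c =>
    if prog.getD (i+1) "" = "C" then pvScanA prog i (n_c + 1)
    else if prog.getD (i+1) "" = "S" ∧ prog.getD i "" = "C" then
      some ((prog.set (i+1) (prog.getD i "")).set i (prog.getD (i+1) ""), n_c)
    else pvScanA prog i n_c

lemma pvCSInv_swap (a b : List String) :
    pvCSInv (a ++ "S" :: "C" :: b) < pvCSInv (a ++ "C" :: "S" :: b) := by
  induction a with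
  | nil => simp [pvCSInv, List.count_cons]
  | cons x a ih =>
    simp only [List.cons_append, pvCSInv]
    have hc : (a ++ "S" :: "C" :: b).count "S" = (a ++ "C" :: "S" :: b).count "S" := by
      simp [List.count_append, List.count_cons]
    rw [hc]
    omega

lemma pvScanA_some_measure (prog : List String) :
    ∀ i n p' nc, pvScanA prog i n = some (p', nc) → pvCSInv p' < pvCSInv prog := by
  intro i
  induction i with
  | zero => intro n p' nc h; simp [pvScanA] at h
  | succ i ih =>
    intro n p' nc h
    unfold pvScanA at h
    split_ifs at h with h1 h2
    · exact ih _ _ _ h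
    · obtain ⟨hS, hC⟩ := h2
      have hi1 : i + 1 < prog.length := by
        by_contra hb
        rw [List.getD_eq_default _ _ (by omega)] at hS
        exact absurd hS (by decide)
      have hi : i < prog.length := by omega
      rw [List.getD_eq_getElem _ _ hi1] at hS
      rw [List.getD_eq_getElem _ _ hi] at hC
      injection h with h
      rw [Prod.mk.injEq] at h
      obtain ⟨hp, hn⟩ := h
      have hlen : (prog.take i).length = i := by
        rw [List.length_take]; omega
      have hrep : prog = prog.take i ++ "C" :: "S" :: prog.drop (i+2) := by
        conv_lhs => rw [← List.take_append_drop i prog]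
        rw [List.drop_eq_getElem_cons hi, List.drop_eq_getElem_cons hi1, hC, hS]
      have hset : (prog.set (i + 1) (prog.getD i "")).set i (prog.getD (i + 1) "") =
          prog.take i ++ "S" :: "C" :: prog.drop (i+2) := by
        rw [List.getD_eq_getElem _ _ hi, List.getD_eq_getElem _ _ hi1, hC, hS]
        conv_lhs => rw [hrep]
        rw [List.set_append_right _ _ (by omega), hlen]
        have h2 : i + 1 - i = 1 := by omega
        rw [h2]
        simp only [List.set]
        rw [List.set_append_right _ _ (by omega), hlen]
        simp
      rw [← hp, hset]
      conv_rhs => rw [hrep]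
      exact pvCSInv_swap _ _
    · exact ih _ _ _ h

def pvLoopA (target power : Int) : List String → Int → Int → String
  | prog, dmg, result =>
    if dmg > target then
      match h : pvScanA prog (prog.length - 1) 1 with
      | some pr => pvLoopA target power pr.1 (dmg - pvShr power pr.2) (result + 1)
      | none => "IMPOSSIBLE"
    else PySem.Int.toStr result
  termination_by prog _ _ => pvCSInv prog
  decreasing_by exact pvScanA_some_measure prog _ _ _ _ h

def save_universe (target : Int) (program : List String) : String :=
  let st := program.foldl (fun (s : Int × Int) step =>
    if step = "C" then (s.1, s.2 * 2)
    else if step = "S" then (s.1 + s.2, s.2)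
    else s) (0, 1)
  pvLoopA target st.2 program st.1 0

-- ===== PORT B =====
-- Python '<<' : both uses shift a nonnegative amount (exponents are ≥ 0, and e ≥ 1 when e-1 is shifted)
def pvShl (a : Int) (n : Int) : Int := a * 2 ^ n.toNat

-- Source B's `for p in pairs` best-search (best carried as (index, best[0]))
def pvFindBest : List (Int × Int) → Nat → Option (Nat × Int) → Option (Nat × Int)
  | [], _, best => best
  | p :: rest, i, best =>
    match best with
    | none => if p.2 < p.1 then pvFindBest rest (i+1) (some (i, p.1)) else pvFindBest rest (i+1) none
    | some b => if p.2 < p.1 ∧ b.2 < p.1 then pvFindBest rest (i+1) (some (i, p.1))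
                else pvFindBest rest (i+1) (some b)

-- termination measure for Source B's while loop
def pvMovSum : List (Int × Int) → Nat
  | [] => 0
  | p :: rest => (p.1 - p.2).toNat + pvMovSum rest

lemma pvFindBest_spec :
    ∀ (l : List (Int × Int)) i best idx e, pvFindBest l i best = some (idx, e) →
      best = some (idx, e) ∨ ∃ j, ∃ hj : j < l.length, idx = i + j ∧ l[j].1 = e ∧ l[j].2 < l[j].1 := by
  intro l
  induction l with
  | nil => intro i best idx e h; simp [pvFindBest] at h; simp [h]
  | cons p rest ih =>
    intro i best idx e h
    rcases best with _ | b <;> unfold pvFindBest at h <;> dsimp only at h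
    · split_ifs at h with h1
      · rcases ih _ _ _ _ h with h2 | ⟨j, hj, rfl, he, hm⟩
        · injection h2 with h2; obtain ⟨rfl, rfl⟩ := Prod.mk.injEq .. ▸ h2
          exact Or.inr ⟨0, by simp, by omega, rfl, h1⟩
        · exact Or.inr ⟨j+1, by simpa using hj, by omega, by simpa using he, by simpa using hm⟩
      · rcases ih _ _ _ _ h with h2 | ⟨j, hj, rfl, he, hm⟩
        · simp at h2
        · exact Or.inr ⟨j+1, by simpa using hj, by omega, by simpa using he, by simpa using hm⟩
    · split_ifs at h with h1
      · rcases ih _ _ _ _ h with h2 | ⟨j, hj, rfl, he, hm⟩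
        · injection h2 with h2; obtain ⟨rfl, rfl⟩ := Prod.mk.injEq .. ▸ h2
          exact Or.inr ⟨0, by simp, by omega, rfl, h1.1⟩
        · exact Or.inr ⟨j+1, by simpa using hj, by omega, by simpa using he, by simpa using hm⟩
      · rcases ih _ _ _ _ h with h2 | ⟨j, hj, rfl, he, hm⟩
        · exact Or.inl h2
        · exact Or.inr ⟨j+1, by simpa using hj, by omega, by simpa using he, by simpa using hm⟩

lemma pvMovSum_modify_dec :
    ∀ (l : List (Int × Int)) j, ∀ hj : j < l.length, l[j].2 < l[j].1 →
      pvMovSum (l.modify j (fun p => (p.1 - 1, p.2))) < pvMovSum l := by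
  intro l
  induction l with
  | nil => intro j hj; simp at hj
  | cons p rest ih =>
    intro j hj hm
    cases j with
    | zero =>
      have e0 : (p :: rest).modify 0 (fun p => (p.1 - 1, p.2)) = (p.1 - 1, p.2) :: rest := by
        simp [List.modify]
      rw [e0]
      simp only [pvMovSum]
      simp only [List.getElem_cons_zero] at hm
      omega
    | succ j =>
      have e1 : (p :: rest).modify (j + 1) (fun p => (p.1 - 1, p.2)) = p :: rest.modify j (fun p => (p.1 - 1, p.2)) := by
        simp [List.modify]
      rw [e1]
      simp only [pvMovSum]
      have := ih j (by simpa using hj) (by simpa using hm)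
      omega

lemma pvFindBest_movable (l : List (Int × Int)) (idx : Nat) (e : Int)
    (h : pvFindBest l 0 none = some (idx, e)) :
    ∃ hj : idx < l.length, l[idx].2 < l[idx].1 := by
  rcases pvFindBest_spec l 0 none idx e h with h2 | ⟨j, hj, hij, he, hm⟩
  · simp at h2
  · subst hij; simpa using ⟨hj, hm⟩

def pvLoopB (target : Int) : List (Int × Int) → Int → Int → String
  | pairs, dmg, swaps =>
    if dmg > target then
      match h : pvFindBest pairs 0 none with
      | some ie => pvLoopB target (pairs.modify ie.1 (fun p => (p.1 - 1, p.2)))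
                     (dmg - pvShl 1 (ie.2 - 1)) (swaps + 1)
      | none => "IMPOSSIBLE"
    else PySem.Int.toStr swaps
  termination_by pairs _ _ => pvMovSum pairs
  decreasing_by
    obtain ⟨hj, hm⟩ := pvFindBest_movable pairs ie.1 ie.2 h
    exact pvMovSum_modify_dec pairs ie.1 hj hm

def save_universe_alt (target : Int) (program : List String) : String :=
  let st := program.foldl (fun (s : Int × Int × Int × List (Int × Int)) step =>
    if step = "C" then (s.1, s.2.1 + 1, s.2.2.1, s.2.2.2)
    else if step = "S" then (s.1 + pvShl 1 s.2.1, s.2.1, s.2.2.1, s.2.2.2 ++ [(s.2.1, s.2.2.1)])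
    else (s.1, s.2.1, s.2.1, s.2.2.2)) (0, 0, 0, [])
  pvLoopB target st.2.2.2 st.1 0

-- ===== PRECONDITION & SPEC =====
-- No Pre_: the two PORTS agree on every input.  (On degenerate programs — everything after the
-- first instruction a "C", at most one "S", target below the residual damage — the Python A loops
-- forever; B and both ports return "IMPOSSIBLE" there.  A also swaps `program` in place; B does not.)
def Spec_save_universe (target : Int) (program : List String) (out : String) : Prop := out = save_universe_alt target program
instance (target : Int) (program : List String) (out : String) : Decidable (Spec_save_universe target program out) := by unfold Spec_save_universe; infer_instance

-- ===== CLAIM (what is proved, stated in full; the proofs are below) =====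
def Claim_equal_save_universe : Prop := ∀ (target : Int) (program : List String), Dom_save_universe target program → Spec_save_universe target program (save_universe target program)

-- ===== LEMMAS AND PROOFS =====

-- abstract compilation of a program (proof-side): damage, number of "C", final floor, (exponent, floor) pairs
def pvCC (l : List String) : Int := (l.count "C" : Int)

def pvDmgD : List String → Int → Int
  | [], _ => 0
  | x :: xs, c => if x = "C" then pvDmgD xs (c+1) else if x = "S" then 2 ^ c.toNat + pvDmgD xs c else pvDmgD xs c

def pvFD : List String → Int → Int → Int
  | [], _, f => f
  | x :: xs, c, f => if x = "C" then pvFD xs (c+1) f else if x = "S" then pvFD xs c f else pvFD xs c c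

def pvPairsD : List String → Int → Int → List (Int × Int)
  | [], _, _ => []
  | x :: xs, c, f => if x = "C" then pvPairsD xs (c+1) f else if x = "S" then (c, f) :: pvPairsD xs c f else pvPairsD xs c c

lemma pvFoldA_eq : ∀ (l : List String) (d c : Int), 0 ≤ c →
    l.foldl (fun (s : Int × Int) step =>
      if step = "C" then (s.1, s.2 * 2)
      else if step = "S" then (s.1 + s.2, s.2) else s) (d, 2 ^ c.toNat)
      = (d + pvDmgD l c, 2 ^ (c + pvCC l).toNat) := by
  intro l
  induction l with
  | nil => intro d c hc; simp [pvDmgD, pvCC]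
  | cons x xs ih =>
    intro d c hc
    simp only [List.foldl]
    split_ifs with h1 h2
    · have hp : (2 : Int) ^ c.toNat * 2 = 2 ^ (c + 1).toNat := by
        have : (c + 1).toNat = c.toNat + 1 := by omega
        rw [this, pow_succ]
      rw [hp, ih d (c+1) (by omega)]
      have hcc : c + 1 + pvCC xs = c + pvCC (x :: xs) := by
        simp [pvCC, List.count_cons, h1]; push_cast; ring
      rw [show pvDmgD (x :: xs) c = pvDmgD xs (c+1) by simp [pvDmgD, h1], hcc]
    · rw [ih (d + 2 ^ c.toNat) c hc]
      have hcc : pvCC (x :: xs) = pvCC xs := by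
        simp [pvCC, List.count_cons, h1]
      rw [show pvDmgD (x :: xs) c = 2 ^ c.toNat + pvDmgD xs c by simp [pvDmgD, h1, h2], hcc]
      ring_nf
    · rw [ih d c hc]
      have hcc : pvCC (x :: xs) = pvCC xs := by
        simp [pvCC, List.count_cons, h1]
      rw [show pvDmgD (x :: xs) c = pvDmgD xs c by simp [pvDmgD, h1, h2], hcc]

lemma pvFoldB_eq : ∀ (l : List String) (d c f : Int) (ps : List (Int × Int)),
    l.foldl (fun (s : Int × Int × Int × List (Int × Int)) step =>
      if step = "C" then (s.1, s.2.1 + 1, s.2.2.1, s.2.2.2)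
      else if step = "S" then (s.1 + pvShl 1 s.2.1, s.2.1, s.2.2.1, s.2.2.2 ++ [(s.2.1, s.2.2.1)])
      else (s.1, s.2.1, s.2.1, s.2.2.2)) (d, c, f, ps)
      = (d + pvDmgD l c, c + pvCC l, pvFD l c f, ps ++ pvPairsD l c f) := by
  intro l
  induction l with
  | nil => intro d c f ps; simp [pvDmgD, pvCC, pvFD, pvPairsD]
  | cons x xs ih =>
    intro d c f ps
    simp only [List.foldl]
    split_ifs with h1 h2
    · rw [ih]
      simp [pvDmgD, pvFD, pvPairsD, pvCC, h1, pvShl, Prod.ext_iff]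
      push_cast
      ring_nf
      try omega
    · rw [ih]
      simp [pvDmgD, pvFD, pvPairsD, pvCC, h1, h2, pvShl, Prod.ext_iff]
      try push_cast
      try ring_nf
      try omega
    · rw [ih]
      simp [pvDmgD, pvFD, pvPairsD, pvCC, h1, h2, pvShl, Prod.ext_iff]

lemma pvPairsD_append : ∀ (a b : List String) (c f : Int),
    pvPairsD (a ++ b) c f = pvPairsD a c f ++ pvPairsD b (c + pvCC a) (pvFD a c f) := by
  intro a
  induction a with
  | nil => intro b c f; simp [pvPairsD, pvCC, pvFD]
  | cons x xs ih =>
    intro b c f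
    simp only [List.cons_append, pvPairsD, pvFD]
    split_ifs with h1 h2
    · rw [ih]
      have : c + 1 + pvCC xs = c + pvCC (x :: xs) := by
        first | (simp [pvCC, List.count_cons, h1]; omega) | simp [pvCC, List.count_cons, h1] | (simp [pvCC, List.count_cons, h1]; push_cast; ring)
      rw [this]
      try simp [pvFD, h1]
    · rw [ih]
      have : pvCC (x :: xs) = pvCC xs := by simp [pvCC, List.count_cons, h1]
      rw [this]
      try simp [pvFD, h1, h2]
    · rw [ih]
      have : pvCC (x :: xs) = pvCC xs := by simp [pvCC, List.count_cons, h1]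
      rw [this]
      try simp [pvFD, h1, h2]

lemma pvPairsD_bound : ∀ (l : List String) (c f : Int), f ≤ c →
    ∀ p ∈ pvPairsD l c f, p.1 ≤ c + pvCC l ∧ p.2 ≤ p.1 := by
  intro l
  induction l with
  | nil => intro c f hf p hp; simp [pvPairsD] at hp
  | cons x xs ih =>
    intro c f hf p hp
    have hcnt : (0 : Int) ≤ pvCC xs := by unfold pvCC; positivity
    simp only [pvPairsD] at hp
    split_ifs at hp with h1 h2
    · have := ih (c+1) f (by omega) p hp
      have hcc : c + pvCC (x :: xs) = c + 1 + pvCC xs := by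
        first | (simp [pvCC, List.count_cons, h1]; omega) | simp [pvCC, List.count_cons, h1] | (simp [pvCC, List.count_cons, h1]; push_cast; ring)
      rw [hcc]; try exact this
    · have hcc : pvCC (x :: xs) = pvCC xs := by simp [pvCC, List.count_cons, h1]
      rw [hcc]
      rcases List.mem_cons.mp hp with rfl | hp
      · constructor <;> simp <;> omega
      · exact ih c f hf p hp
    · have hcc : pvCC (x :: xs) = pvCC xs := by simp [pvCC, List.count_cons, h1]
      rw [hcc]
      exact ih c c (le_refl c) p hp

lemma pvFD_le : ∀ (l : List String) (c f : Int), f ≤ c → pvFD l c f ≤ c + pvCC l := by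
  intro l
  induction l with
  | nil => intro c f hf; simp [pvFD, pvCC]; omega
  | cons x xs ih =>
    intro c f hf
    have hcnt : (0 : Int) ≤ pvCC xs := by unfold pvCC; positivity
    simp only [pvFD]
    split_ifs with h1 h2
    · have := ih (c+1) f (by omega)
      have hcc : c + pvCC (x :: xs) = c + 1 + pvCC xs := by
        first | (simp [pvCC, List.count_cons, h1]; omega) | simp [pvCC, List.count_cons, h1] | (simp [pvCC, List.count_cons, h1]; push_cast; ring)
      rw [hcc]; try exact this
    · have hcc : pvCC (x :: xs) = pvCC xs := by simp [pvCC, List.count_cons, h1]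
      rw [hcc]; exact ih c f hf
    · have hcc : pvCC (x :: xs) = pvCC xs := by simp [pvCC, List.count_cons, h1]
      rw [hcc]; exact ih c c (le_refl c)

def pvNoCS : List String → Bool
  | x :: y :: rest => !(x = "C" && y = "S") && pvNoCS (y :: rest)
  | _ => true

lemma pvNoCS_tail : ∀ (x : String) (xs : List String), pvNoCS (x :: xs) = true → pvNoCS xs = true := by
  intro x xs h
  cases xs with
  | nil => simp [pvNoCS]
  | cons y rest => simp [pvNoCS] at h ⊢; exact h.2

lemma pvNoCS_head : ∀ (xs : List String), pvNoCS ("C" :: xs) = true → xs.headD "" ≠ "S" := by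
  intro xs h
  cases xs with
  | nil => decide
  | cons y rest => simp [pvNoCS] at h ⊢; exact h.1

lemma pvNoCS_of_getD : ∀ (l : List String),
    (∀ k, ¬(l.getD k "" = "C" ∧ l.getD (k+1) "" = "S")) → pvNoCS l = true := by
  intro l
  induction l with
  | nil => intro _; simp [pvNoCS]
  | cons x xs ih =>
    intro h
    cases xs with
    | nil => simp [pvNoCS]
    | cons y rest =>
      simp only [pvNoCS, Bool.and_eq_true, Bool.not_eq_true']
      constructor
      · have := h 0
        simp only [List.getD_cons_zero, List.getD_cons_succ] at this
        simpa using this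
      · exact ih (fun k => by have := h (k+1); simpa using this)

-- every pair compiled from a swap-free block is (c, f) itself or is immovable (exponent = floor)
lemma pvPairsD_noCS : ∀ (l : List String) (c f : Int), pvNoCS l = true →
    (∀ p ∈ pvPairsD l c f, p = (c, f) ∨ p.1 = p.2) ∧
    (l.headD "" ≠ "S" → ∀ p ∈ pvPairsD l c f, p.1 = p.2) := by
  intro l
  induction l with
  | nil => intro c f _; simp [pvPairsD]
  | cons x xs ih =>
    intro c f hno
    have hxs : pvNoCS xs = true := pvNoCS_tail x xs hno
    constructor
    · intro p hp
      simp only [pvPairsD] at hp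
      split_ifs at hp with h1 h2
      · right
        exact (ih (c+1) f hxs).2 (pvNoCS_head xs (h1 ▸ hno)) p hp
      · rcases List.mem_cons.mp hp with rfl | hp
        · exact Or.inl rfl
        · exact (ih c f hxs).1 p hp
      · rcases (ih c c hxs).1 p hp with rfl | h
        · right; rfl
        · exact Or.inr h
    · intro hhead p hp
      simp only [pvPairsD] at hp
      split_ifs at hp with h1 h2
      · exact (ih (c+1) f hxs).2 (pvNoCS_head xs (h1 ▸ hno)) p hp
      · exact absurd (by simpa using h2) (by simpa using hhead)
      · rcases (ih c c hxs).1 p hp with rfl | h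
        · rfl
        · exact h

lemma pvFindBest_cons_none (p : Int × Int) (rest : List (Int × Int)) (i : Nat) :
    pvFindBest (p :: rest) i none
      = if p.2 < p.1 then pvFindBest rest (i+1) (some (i, p.1)) else pvFindBest rest (i+1) none := rfl

lemma pvFindBest_cons_some (p : Int × Int) (rest : List (Int × Int)) (i : Nat) (b : Nat × Int) :
    pvFindBest (p :: rest) i (some b)
      = if p.2 < p.1 ∧ b.2 < p.1 then pvFindBest rest (i+1) (some (i, p.1))
        else pvFindBest rest (i+1) (some b) := rfl

lemma pvFindBest_append : ∀ (l1 l2 : List (Int × Int)) (i : Nat) (best : Option (Nat × Int)),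
    pvFindBest (l1 ++ l2) i best = pvFindBest l2 (i + l1.length) (pvFindBest l1 i best) := by
  intro l1
  induction l1 with
  | nil => intro l2 i best; simp [pvFindBest]
  | cons p rest ih =>
    intro l2 i best
    simp only [List.cons_append, List.length_cons]
    have step : ∀ (b' : Option (Nat × Int)), pvFindBest (rest ++ l2) (i+1) b'
        = pvFindBest l2 (i + (rest.length + 1)) (pvFindBest rest (i+1) b') := by
      intro b'; rw [ih]; congr 1; omega
    rcases best with _ | b <;>
      simp only [pvFindBest_cons_none, pvFindBest_cons_some] <;> split_ifs <;> apply step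

lemma pvFindBest_skip : ∀ (l : List (Int × Int)) (i k : Nat) (E : Int),
    (∀ p ∈ l, p.2 < p.1 → p.1 ≤ E) → pvFindBest l i (some (k, E)) = some (k, E) := by
  intro l
  induction l with
  | nil => intro i k E _; simp [pvFindBest]
  | cons p rest ih =>
    intro i k E hb
    unfold pvFindBest
    dsimp only
    rw [if_neg]
    · exact ih (i+1) k E (fun q hq => hb q (List.mem_cons_of_mem _ hq))
    · rintro ⟨h1, h2⟩
      exact absurd (hb p (List.mem_cons_self ..) h1) (by omega)

lemma pvFindBest_none_of : ∀ (l : List (Int × Int)) (i : Nat),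
    (∀ p ∈ l, ¬ p.2 < p.1) → pvFindBest l i none = none := by
  intro l
  induction l with
  | nil => intro i _; simp [pvFindBest]
  | cons p rest ih =>
    intro i hb
    unfold pvFindBest
    dsimp only
    rw [if_neg (hb p (List.mem_cons_self ..))]
    exact ih (i+1) (fun q hq => hb q (List.mem_cons_of_mem _ hq))

lemma pvModify_append_len : ∀ (pre : List (Int × Int)) (x : Int × Int) (suf : List (Int × Int))
    (g : Int × Int → Int × Int), (pre ++ x :: suf).modify pre.length g = pre ++ g x :: suf := by
  intro pre
  induction pre with
  | nil => intro x suf g; simp [List.modify]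
  | cons q rest ih =>
    intro x suf g
    simp only [List.cons_append, List.length_cons]
    have e1 : (q :: (rest ++ x :: suf)).modify (rest.length + 1) g
        = q :: (rest ++ x :: suf).modify rest.length g := by simp [List.modify]
    rw [e1, ih]

lemma pvGetD_drop : ∀ (l : List String) (m k : Nat), (l.drop m).getD k "" = l.getD (m + k) "" := by
  intro l m k
  simp [List.getD_eq_getElem?_getD, List.getElem?_drop]

lemma pvScanA_none (prog : List String) : ∀ (i : Nat) (n : Int), pvScanA prog i n = none →
    ∀ j, 1 ≤ j → j ≤ i → ¬(prog.getD j "" = "S" ∧ prog.getD (j-1) "" = "C") := by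
  intro i
  induction i with
  | zero => intro n _ j h1j h2j; omega
  | succ i ih =>
    intro n h j h1j h2j
    unfold pvScanA at h
    split_ifs at h with h1 h2
    · rcases Nat.lt_or_ge j (i+1) with hj | hj
      · exact ih _ h j h1j (by omega)
      · have : j = i + 1 := by omega
        subst this
        rintro ⟨hS, _⟩
        rw [h1] at hS
        exact absurd hS (by decide)
    · rcases Nat.lt_or_ge j (i+1) with hj | hj
      · exact ih _ h j h1j (by omega)
      · have : j = i + 1 := by omega
        subst this
        simpa using h2

lemma pvScanA_some (prog : List String) : ∀ (i : Nat) (n : Int) (p' : List String) (nc : Int),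
    pvScanA prog i n = some (p', nc) →
    ∃ j, 1 ≤ j ∧ j ≤ i ∧ ∃ hj : j < prog.length,
      prog[j] = "S" ∧ prog[j-1]'(by omega) = "C" ∧
      (∀ j', j < j' → j' ≤ i → ¬(prog.getD j' "" = "S" ∧ prog.getD (j'-1) "" = "C")) ∧
      p' = (prog.set j "C").set (j-1) "S" ∧
      nc = n + (((prog.drop (j+1)).take (i - j)).count "C" : Int) := by
  intro i
  induction i with
  | zero => intro n p' nc h; simp [pvScanA] at h
  | succ i ih =>
    intro n p' nc h
    unfold pvScanA at h
    split_ifs at h with h1 h2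
    · -- program[i+1] = "C": recurse, one more counted "C"
      obtain ⟨j, hj1, hj2, hjlen, hS, hC, hmax, hp, hn⟩ := ih _ _ _ h
      have hi1 : i + 1 < prog.length := by
        by_contra hb
        rw [List.getD_eq_default _ _ (by omega)] at h1
        exact absurd h1 (by decide)
      refine ⟨j, hj1, by omega, hjlen, hS, hC, ?_, hp, ?_⟩
      · intro j' hj' hj'i
        rcases Nat.lt_or_ge j' (i+1) with hlt | hge
        · exact hmax j' hj' (by omega)
        · have : j' = i + 1 := by omega
          subst this
          rintro ⟨hS', _⟩
          rw [h1] at hS'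
          exact absurd hS' (by decide)
      · have hd : (prog.drop (j+1))[i - j]? = some "C" := by
          rw [List.getElem?_drop]
          have : j + 1 + (i - j) = i + 1 := by omega
          rw [this, List.getElem?_eq_getElem hi1]
          have hv : prog[i+1] = "C" := by
            rw [← List.getD_eq_getElem prog "" hi1]; exact h1
          rw [hv]
        have ht : (prog.drop (j+1)).take (i + 1 - j) = (prog.drop (j+1)).take (i - j) ++ ["C"] := by
          have h2 : i + 1 - j = (i - j) + 1 := by omega
          rw [h2, List.take_add_one, hd]
          rfl
        rw [ht, List.count_append, hn]
        simp
        push_cast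
        ring
    · -- the swap position: j = i + 1
      have hS : prog.getD (i+1) "" = "S" := h2.1
      have hC : prog.getD i "" = "C" := h2.2
      have hi1 : i + 1 < prog.length := by
        by_contra hb
        rw [List.getD_eq_default _ _ (by omega)] at hS
        exact absurd hS (by decide)
      injection h with h
      rw [Prod.mk.injEq] at h
      obtain ⟨hp, hn⟩ := h
      refine ⟨i+1, by omega, le_refl _, hi1, ?_, ?_, ?_, ?_, ?_⟩
      · rw [← List.getD_eq_getElem _ "" hi1]; exact hS
      · have hv : prog[i]'(by omega) = "C" := by
          rw [← List.getD_eq_getElem prog "" (show i < prog.length by omega)]; exact hC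
        simpa using hv
      · intro j' hj' hj'i _; omega
      · rw [← hp, hC, h2.1]
        simp
      · rw [← hn]
        simp
    · -- neither: recurse
      obtain ⟨j, hj1, hj2, hjlen, hS, hC, hmax, hp, hn⟩ := ih _ _ _ h
      have hi1le : j < i + 1 := by omega
      refine ⟨j, hj1, by omega, hjlen, hS, hC, ?_, hp, ?_⟩
      · intro j' hj' hj'i
        rcases Nat.lt_or_ge j' (i+1) with hlt | hge
        · exact hmax j' hj' (by omega)
        · have : j' = i + 1 := by omega
          subst this
          simpa using h2
      · rw [hn]
        have hlen : prog.length ≤ i + 1 ∨ i + 1 < prog.length := by omega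
        have hnone : (prog.drop (j+1))[i - j]? = none ∨ (prog.drop (j+1))[i - j]? = some (prog.getD (i+1) "") := by
          rw [List.getElem?_drop]
          have he : j + 1 + (i - j) = i + 1 := by omega
          rw [he]
          rcases hlen with hl | hl
          · left; exact List.getElem?_eq_none hl
          · right; rw [List.getElem?_eq_getElem hl, List.getD_eq_getElem _ "" hl]
        have h2' : i + 1 - j = (i - j) + 1 := by omega
        rw [h2', List.take_add_one]
        rcases hnone with hno | hsome
        · rw [hno]; simp
        · rw [hsome]
          simp only [Option.toList_some, List.count_append]
          have hz : List.count "C" [prog.getD (i+1) ""] = 0 := by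
            simp [List.count_singleton]
            intro hcc
            exact h1 (by simpa using hcc)
          rw [hz]
          try push_cast
          try ring

-- the heart of the equivalence: when A's scan finds a swap, B's best-search picks the matching pair,
-- the damage reductions agree, and the compiled pair lists stay in lockstep
lemma pvStep (prog p' : List String) (nc : Int)
    (h : pvScanA prog (prog.length - 1) 1 = some (p', nc)) :
    ∃ idx e, pvFindBest (pvPairsD prog 0 0) 0 none = some (idx, e) ∧
      (pvPairsD prog 0 0).modify idx (fun p => (p.1 - 1, p.2)) = pvPairsD p' 0 0 ∧
      pvShr (2 ^ (pvCC prog).toNat) nc = pvShl 1 (e - 1) ∧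
      pvCC p' = pvCC prog := by
  obtain ⟨j, hj1, hj2, hjlen, hS, hC, hmax, hp, hn⟩ := pvScanA_some prog _ _ _ _ h
  have hj1len : j - 1 < prog.length := by omega
  have hrep : prog = prog.take (j-1) ++ "C" :: "S" :: prog.drop (j+1) := by
    conv_lhs => rw [← List.take_append_drop (j-1) prog]
    congr 1
    rw [List.drop_eq_getElem_cons hj1len, hC]
    have hj0 : j - 1 + 1 = j := by omega
    rw [hj0, List.drop_eq_getElem_cons hjlen, hS]
  generalize hadef : prog.take (j-1) = a at hrep
  generalize hbdef : prog.drop (j+1) = b at hrep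
  have ha_len : a.length = j - 1 := by
    rw [← hadef, List.length_take]; omega
  have hswap : p' = a ++ "S" :: "C" :: b := by
    rw [hp]
    conv_lhs => rw [hrep]
    rw [List.set_append_right _ _ (by omega : a.length ≤ j)]
    have h1 : j - a.length = 1 := by omega
    rw [h1]
    simp only [List.set]
    rw [List.set_append_right _ _ (by omega : a.length ≤ j - 1)]
    have h0 : j - 1 - a.length = 0 := by omega
    rw [h0]
    simp only [List.set]
  have hnoCS : pvNoCS b = true := by
    apply pvNoCS_of_getD
    intro k
    rintro ⟨hCk, hSk⟩
    rw [← hbdef, pvGetD_drop] at hCk hSk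
    have e1 : j + 1 + (k + 1) = j + k + 2 := by omega
    have e2 : j + 1 + k = j + k + 2 - 1 := by omega
    rw [e1] at hSk
    rw [e2] at hCk
    by_cases hle : j + k + 2 ≤ prog.length - 1
    · exact hmax (j+k+2) (by omega) hle ⟨hSk, hCk⟩
    · rw [List.getD_eq_default _ _ (by omega)] at hSk
      exact absurd hSk (by decide)
  have hca : pvCC prog = pvCC a + 1 + pvCC b := by
    rw [hrep]
    simp [pvCC, List.count_append, List.count_cons]
    push_cast
    ring
  have hcp' : pvCC p' = pvCC a + 1 + pvCC b := by
    rw [hswap]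
    simp [pvCC, List.count_append, List.count_cons]
    push_cast
    ring
  have hpairs : pvPairsD prog 0 0
      = pvPairsD a 0 0 ++ (pvCC a + 1, pvFD a 0 0) :: pvPairsD b (pvCC a + 1) (pvFD a 0 0) := by
    conv_lhs => rw [hrep]
    rw [pvPairsD_append]
    simp [pvPairsD]
  have hpairs' : pvPairsD p' 0 0
      = pvPairsD a 0 0 ++ (pvCC a, pvFD a 0 0) :: pvPairsD b (pvCC a + 1) (pvFD a 0 0) := by
    rw [hswap, pvPairsD_append]
    simp [pvPairsD]
  have hfa_le : pvFD a 0 0 ≤ pvCC a := by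
    have := pvFD_le a 0 0 (le_refl 0)
    simpa using this
  have hbnd := pvPairsD_bound a 0 0 (le_refl 0)
  have hbK := (pvPairsD_noCS b (pvCC a + 1) (pvFD a 0 0) hnoCS).1
  have hskipb : ∀ p ∈ pvPairsD b (pvCC a + 1) (pvFD a 0 0), p.2 < p.1 → p.1 ≤ pvCC a + 1 := by
    intro p hpmem hmov
    rcases hbK p hpmem with rfl | heq
    · simp
    · omega
  have hfb : pvFindBest (pvPairsD prog 0 0) 0 none
      = some ((pvPairsD a 0 0).length, pvCC a + 1) := by
    rw [hpairs, pvFindBest_append]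
    cases hia : pvFindBest (pvPairsD a 0 0) 0 none with
    | none =>
      rw [pvFindBest_cons_none, if_pos (by simp <;> omega)]
      rw [pvFindBest_skip _ _ _ _ hskipb]
      norm_num
    | some kE =>
      obtain ⟨k, E⟩ := kE
      rcases pvFindBest_spec _ _ _ _ _ hia with habs | ⟨j0, hj0, hk, hE, hmov⟩
      · simp at habs
      have hEle : E ≤ pvCC a := by
        have := (hbnd _ (List.getElem_mem hj0)).1
        rw [hE] at this
        simpa using this
      rw [pvFindBest_cons_some, if_pos ⟨by simp <;> omega, by simp <;> omega⟩]
      rw [pvFindBest_skip _ _ _ _ hskipb]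
      norm_num
  refine ⟨(pvPairsD a 0 0).length, pvCC a + 1, hfb, ?_, ?_, by omega⟩
  · rw [hpairs, pvModify_append_len, hpairs']
    norm_num
  · have htake : (prog.drop (j+1)).take (prog.length - 1 - j) = b := by
      rw [hbdef]
      apply List.take_of_length_le
      rw [← hbdef, List.length_drop]
      omega
    rw [htake] at hn
    have hnn : nc = 1 + (b.count "C" : Int) := by rw [hn]
    have hcnt_a : pvCC a = (a.count "C" : Int) := rfl
    have hcnt_b : pvCC b = (b.count "C" : Int) := rfl
    have htn : ((pvCC prog).toNat) = a.count "C" + 1 + b.count "C" := by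
      rw [hca, hcnt_a, hcnt_b]; omega
    have htn2 : (nc).toNat = 1 + b.count "C" := by rw [hnn]; omega
    unfold pvShr pvShl
    rw [htn, htn2]
    have hsplit : (2:Int) ^ (a.count "C" + 1 + b.count "C") = 2 ^ (a.count "C") * 2 ^ (1 + b.count "C") := by
      ring
    have hdiv : (2:Int) ^ (a.count "C") * 2 ^ (1 + b.count "C") / 2 ^ (1 + b.count "C") = 2 ^ (a.count "C") := by
      first
        | exact Int.mul_div_cancel _ (by positivity)
        | exact Int.mul_ediv_cancel _ (by positivity)
    rw [hsplit, hdiv]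
    have : (pvCC a + 1 - 1).toNat = a.count "C" := by rw [hcnt_a]; omega
    rw [this, one_mul]

-- when A's scan finds nothing to swap, every compiled pair is already at its floor
lemma pvNone (prog : List String) (h : pvScanA prog (prog.length - 1) 1 = none) :
    pvFindBest (pvPairsD prog 0 0) 0 none = none := by
  have hadj := pvScanA_none prog _ _ h
  have hno : pvNoCS prog = true := by
    apply pvNoCS_of_getD
    intro k
    rintro ⟨hCk, hSk⟩
    by_cases hle : k + 1 ≤ prog.length - 1
    · exact hadj (k+1) (by omega) hle ⟨hSk, by simpa using hCk⟩
    · rw [List.getD_eq_default _ _ (by omega)] at hSk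
      exact absurd hSk (by decide)
  have hK := (pvPairsD_noCS prog 0 0 hno).1
  apply pvFindBest_none_of
  intro p hp
  rcases hK p hp with rfl | heq
  · simp
  · omega

lemma pvLoop_eq : ∀ (N : Nat) (prog : List String), pvCSInv prog < N → ∀ (target dmg result : Int),
    pvLoopA target (2 ^ (pvCC prog).toNat) prog dmg result
      = pvLoopB target (pvPairsD prog 0 0) dmg result := by
  intro N
  induction N with
  | zero => intro prog h; omega
  | succ N ih =>
    intro prog hN target dmg result
    rw [pvLoopA, pvLoopB]
    by_cases hd : dmg > target
    · rw [if_pos hd, if_pos hd]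
      split
      · rename_i pr heq
        split
        · rename_i ie heq2
          obtain ⟨idx, e, hfb, hmod, hred, hcc⟩ := pvStep prog pr.1 pr.2 (by rw [heq])
          have hie : ie = (idx, e) := by
            have h3 := heq2.symm.trans hfb
            injection h3
          have hmeas : pvCSInv pr.1 < N := by
            have h4 := pvScanA_some_measure prog _ _ _ _ (show pvScanA prog (prog.length - 1) 1 = some (pr.1, pr.2) by rw [heq])
            omega
          rw [hie]
          simp only []
          rw [← hred]
          rw [show (2:Int) ^ (pvCC prog).toNat = 2 ^ (pvCC pr.1).toNat by rw [hcc]]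
          rw [ih pr.1 hmeas target (dmg - pvShr (2 ^ (pvCC pr.1).toNat) pr.2) (result + 1)]
          rw [hmod]
        · rename_i heq2
          obtain ⟨idx, e, hfb, _, _, _⟩ := pvStep prog pr.1 pr.2 (by rw [heq])
          rw [heq2] at hfb
          cases hfb
      · rename_i heq
        split
        · rename_i ie heq2
          rw [pvNone prog heq] at heq2
          cases heq2
        · rfl
    · rw [if_neg hd, if_neg hd]

-- ===== VERDICT (by name: the statement is the Claim_ definition above) =====
theorem save_universe_spec : Claim_equal_save_universe := by
  intro target program _
  unfold Spec_save_universe save_universe save_universe_alt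
  have hA := pvFoldA_eq program 0 0 (le_refl 0)
  have hB := pvFoldB_eq program 0 0 0 []
  norm_num at hA hB
  simp only [hA, hB]
  exact pvLoop_eq (pvCSInv program + 1) program (by omega) target (pvDmgD program 0) 0
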